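-- pv_equiv track=rewrite | github.com/jakubborowiecki/Algorytmy_Struktury_Danych | Programowanie dynamiczne.py | wyszukaj_podciag
-- ===== SOURCE A (Python) =====
-- def dopasowanie_PD(P, T):
--     dlugosc_P = len(P)
--     dlugosc_T = len(T)
--
--     dystans = []
--     for i in range(dlugosc_P + 1):
--         dystans.append([0] * (dlugosc_T + 1))
--
--     rodzice = []
--     for i in range(dlugosc_P + 1):
--         rodzice.append(['X'] * (dlugosc_T + 1))
--
--     for i in range(dlugosc_P + 1):
--         dystans[i][0] = i
--     for j in range(dlugosc_T + 1):
--         dystans[0][j] = j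
--
--     for i in range(1, dlugosc_P + 1):
--         for j in range(1, dlugosc_T + 1):
--
--             if P[i - 1] != T[j - 1]:
--                 koszt_wymiany = dystans[i - 1][j - 1] + 1
--             else:
--                 koszt_wymiany = dystans[i - 1][j - 1]
--
--             koszt_usunięcia = dystans[i - 1][j] + 1
--             koszt_wstawienia = dystans[i][j - 1] + 1
--
--             dystans[i][j] = min(koszt_wymiany, koszt_usunięcia, koszt_wstawienia)
--
--
--             if dystans[i][j] == koszt_wymiany:
--                 if P[i - 1] != T[j - 1]:
--                     rodzice[i][j] = 'S'
--                 else: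
--                     rodzice[i][j] = 'M'
--             elif dystans[i][j] == koszt_usunięcia:
--                 rodzice[i][j] = 'D'
--             elif dystans[i][j] == koszt_wstawienia:
--                 rodzice[i][j] = 'I'
--
--     return dystans, rodzice
--
-- def odtwarzanie_sciezki(P, T, parent):
--     i = len(P)
--     j = len(T)
--     sciezka = []
--
--     while i > 0 or j > 0:
--         if i == 0:
--             sciezka.append('I')
--             j -= 1
--         elif j == 0:
--             sciezka.append('D')
--             i -= 1
--         else:
--             operacja = parent[i][j]
--             if operacja in ['M', 'S']:
--                 sciezka.append(operacja)
--                 i -= 1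
--                 j -= 1
--             elif operacja == 'I':
--                 sciezka.append(operacja)
--                 j -= 1
--             elif operacja == 'D':
--                 sciezka.append(operacja)
--                 i -= 1
--
--     return ''.join(sciezka[::-1])
--
-- def wyszukaj_podciag(P, T):
--     dlugosc_P = len(P)
--     dlugosc_T = len(T)
--
--     dystans, rodzice = dopasowanie_PD(P, T)
--
--     minimalny_koszt = float('inf')
--     for j in range(dlugosc_T + 1):
--         minimalny_koszt = min(minimalny_koszt, dystans[dlugosc_P][j])
--
--     minimalny_indeks = dystans[dlugosc_P].index(minimalny_koszt)
--
--     sciezka = odtwarzanie_sciezki(P, T, rodzice)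
--
--     return minimalny_koszt, minimalny_indeks, sciezka
-- ===== SOURCE B (Python) =====
-- def wyszukaj_podciag(P, T):
--     # Path-carrying DP: every cell stores (cost, alignment path to that cell),
--     # so the answer path is read off cell (m, n) directly -- no parent table and
--     # no backtracking pass; only one DP row is kept at a time.
--     n = len(T)
--     row = [(j, 'I' * j) for j in range(n + 1)]
--     for i in range(1, len(P) + 1):
--         prev, row = row, [(i, 'D' * i)]
--         for j in range(1, n + 1):
--             sub = P[i - 1] != T[j - 1]
--             diag = prev[j - 1][0] + sub
--             up = prev[j][0] + 1
--             left = row[j - 1][0] + 1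
--             best = min(diag, up, left)
--             if best == diag:
--                 row.append((best, prev[j - 1][1] + ('S' if sub else 'M')))
--             elif best == up:
--                 row.append((best, prev[j][1] + 'D'))
--             else:
--                 row.append((best, row[j - 1][1] + 'I'))
--     costs = [c for c, _ in row]
--     best = min(costs)
--     return best, costs.index(best), row[n][1]
-- ===== Notes on version B (the rewrite author's own statement) =====
-- stated objective: alternative
-- what changed: B replaces A's two-phase scheme (fill a distance table plus a parent-pointer table, then a backtracking while-loop that walks the parents and reverses the collected operations) by a single forward path-carrying DP: each cell stores (cost, alignment string to that cell), only one row is kept at a time, and the answer path is read directly from cell (m,n) with no parent table and no backtracking pass.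
import Mathlib
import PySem

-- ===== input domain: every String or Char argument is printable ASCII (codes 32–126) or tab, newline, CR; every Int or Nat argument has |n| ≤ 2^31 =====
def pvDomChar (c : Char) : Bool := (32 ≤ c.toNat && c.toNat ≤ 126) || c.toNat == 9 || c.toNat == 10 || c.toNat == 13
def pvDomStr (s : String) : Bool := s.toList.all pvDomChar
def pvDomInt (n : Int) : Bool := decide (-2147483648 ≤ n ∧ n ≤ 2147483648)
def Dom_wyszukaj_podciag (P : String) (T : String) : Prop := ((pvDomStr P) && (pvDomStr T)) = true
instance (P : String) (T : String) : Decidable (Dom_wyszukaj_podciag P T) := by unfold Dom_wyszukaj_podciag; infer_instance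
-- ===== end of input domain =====

-- B replaces A's parent table + backtracking by a forward path-carrying DP: each cell stores
-- (cost, alignment string), one row kept at a time, and the path is read off cell (m, n).

-- ===== PORT A =====
-- Matrix cells are read with List.getD; every index A uses is in range, so the defaults are never hit.
-- inner-loop body of dopasowanie_PD (one cell update of dystans and rodzice)
def pvAStep (p t : List Char) (i : Nat) (st : List (List Int) × List (List Char)) (j : Nat) :
    List (List Int) × List (List Char) :=
  let d := st.1
  let r := st.2
  let kw := if p.getD (i-1) ' ' ≠ t.getD (j-1) ' '
            then (d.getD (i-1) []).getD (j-1) 0 + 1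
            else (d.getD (i-1) []).getD (j-1) 0
  let ku := (d.getD (i-1) []).getD j 0 + 1
  let kws := (d.getD i []).getD (j-1) 0 + 1
  let v := min kw (min ku kws)
  let d' := d.set i ((d.getD i []).set j v)
  let r' :=
    if v = kw then
      (if p.getD (i-1) ' ' ≠ t.getD (j-1) ' ' then r.set i ((r.getD i []).set j 'S')
       else r.set i ((r.getD i []).set j 'M'))
    else if v = ku then r.set i ((r.getD i []).set j 'D')
    else if v = kws then r.set i ((r.getD i []).set j 'I')
    else r
  (d', r')

def dopasowanie_PD (p t : List Char) : List (List Int) × List (List Char) :=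
  let dystans0 : List (List Int) :=
    (List.range (p.length+1)).map (fun _ => List.replicate (t.length+1) (0:Int))
  let rodzice0 : List (List Char) :=
    (List.range (p.length+1)).map (fun _ => List.replicate (t.length+1) 'X')
  let dystans1 := (List.range (p.length+1)).foldl
    (fun d i => d.set i ((d.getD i []).set 0 (i:Int))) dystans0
  let dystans2 := (List.range (t.length+1)).foldl
    (fun d j => d.set 0 ((d.getD 0 []).set j (j:Int))) dystans1
  (List.range' 1 p.length).foldl
    (fun st i => (List.range' 1 t.length).foldl (fun st j => pvAStep p t i st j) st)
    (dystans2, rodzice0)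

-- the while loop of odtwarzanie_sciezki; Python appends to sciezka, the caller reverses
def odtwarzanie_sciezki (parent : List (List Char)) : List Char → Nat → Nat → List Char
  | acc, 0, 0 => acc
  | acc, 0, j+1 => odtwarzanie_sciezki parent (acc ++ ['I']) 0 j
  | acc, i+1, 0 => odtwarzanie_sciezki parent (acc ++ ['D']) i 0
  | acc, i+1, j+1 =>
    let operacja := (parent.getD (i+1) []).getD (j+1) 'X'
    if operacja = 'M' ∨ operacja = 'S' then odtwarzanie_sciezki parent (acc ++ [operacja]) i j
    else if operacja = 'I' then odtwarzanie_sciezki parent (acc ++ [operacja]) (i+1) j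
    else if operacja = 'D' then odtwarzanie_sciezki parent (acc ++ [operacja]) i (j+1)
    else acc  -- Python loops forever here; unreachable for parent tables built by dopasowanie_PD
  termination_by acc i j => i + j

def wyszukaj_podciag (P : String) (T : String) : Int × Int × String :=
  let p := P.toList
  let t := T.toList
  let dlugosc_P := p.length
  let dlugosc_T := t.length
  let dr := dopasowanie_PD p t
  let dystans := dr.1
  let rodzice := dr.2
  -- float('inf') is ported as a start value strictly larger than every table entry (entries ≤ i+j)
  let minimalny_koszt := (List.range (dlugosc_T+1)).foldl
    (fun acc j => min acc ((dystans.getD dlugosc_P []).getD j 0))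
    ((dlugosc_P : Int) + (dlugosc_T : Int) + 1)
  let minimalny_indeks := (PySem.List.index? (dystans.getD dlugosc_P []) minimalny_koszt).getD 0
  let sciezka := (odtwarzanie_sciezki rodzice [] dlugosc_P dlugosc_T).reverse
  (minimalny_koszt, (minimalny_indeks : Int), String.ofList sciezka)

-- ===== PORT B =====
-- inner-loop body of B: one appended cell (cost, path-so-far)
def pvBStep (p t : List Char) (prev : List (Int × List Char)) (i : Nat)
    (row : List (Int × List Char)) (j : Nat) : List (Int × List Char) :=
  let sub := p.getD (i-1) ' ' ≠ t.getD (j-1) ' '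
  let diag := (prev.getD (j-1) (0, [])).1 + (if sub then 1 else 0)
  let up := (prev.getD j (0, [])).1 + 1
  let left := (row.getD (j-1) (0, [])).1 + 1
  let best := min diag (min up left)
  if best = diag then row ++ [(best, (prev.getD (j-1) (0, [])).2 ++ [if sub then 'S' else 'M'])]
  else if best = up then row ++ [(best, (prev.getD j (0, [])).2 ++ ['D'])]
  else row ++ [(best, (row.getD (j-1) (0, [])).2 ++ ['I'])]

def pvBRow (p t : List Char) (prev : List (Int × List Char)) (i : Nat) : List (Int × List Char) :=
  (List.range' 1 t.length).foldl (fun row j => pvBStep p t prev i row j)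
    [((i : Int), List.replicate i 'D')]

def wyszukaj_podciag_alt (P : String) (T : String) : Int × Int × String :=
  let p := P.toList
  let t := T.toList
  let row := (List.range' 1 p.length).foldl (fun r i => pvBRow p t r i)
    ((List.range (t.length+1)).map (fun (j : Nat) => ((j : Int), List.replicate j 'I')))
  let costs := row.map Prod.fst
  let best := (PySem.List.min? costs (fun x => x)).getD 0
  let idx := (PySem.List.index? costs best).getD 0
  (best, (idx : Int), String.ofList (row.getD t.length ((0:Int), [])).2)

-- ===== PRECONDITION & SPEC =====
def Spec_wyszukaj_podciag (P : String) (T : String) (out : Int × Int × String) : Prop := out = wyszukaj_podciag_alt P T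
instance (P : String) (T : String) (out : Int × Int × String) : Decidable (Spec_wyszukaj_podciag P T out) := by unfold Spec_wyszukaj_podciag; infer_instance

-- ===== CLAIM (what is proved, stated in full; the proofs are below) =====
def Claim_equal_wyszukaj_podciag : Prop := ∀ (P : String) (T : String), Dom_wyszukaj_podciag P T → Spec_wyszukaj_podciag P T (wyszukaj_podciag P T)

-- ===== LEMMAS AND PROOFS =====

-- the edit-distance value at cell (i, j), shared characterisation of both programs
def pvED (p t : List Char) : Nat → Nat → Int
  | 0, j => (j : Int)
  | i+1, 0 => (i : Int) + 1
  | i+1, j+1 =>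
      min (pvED p t i j + (if p.getD i ' ' ≠ t.getD j ' ' then 1 else 0))
        (min (pvED p t i (j+1) + 1) (pvED p t (i+1) j + 1))

-- the operation A's rodzice stores at cell (i+1, j+1)
def pvOp (p t : List Char) (i j : Nat) : Char :=
  if pvED p t (i+1) (j+1) = pvED p t i j + (if p.getD i ' ' ≠ t.getD j ' ' then 1 else 0) then
    (if p.getD i ' ' ≠ t.getD j ' ' then 'S' else 'M')
  else if pvED p t (i+1) (j+1) = pvED p t i (j+1) + 1 then 'D'
  else 'I'

-- the alignment path to cell (i, j), following A's parent priority (diagonal > delete > insert)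
def pvPath (p t : List Char) : Nat → Nat → List Char
  | 0, j => List.replicate j 'I'
  | i+1, 0 => List.replicate (i+1) 'D'
  | i+1, j+1 =>
    if pvED p t (i+1) (j+1) = pvED p t i j + (if p.getD i ' ' ≠ t.getD j ' ' then 1 else 0) then
      pvPath p t i j ++ [if p.getD i ' ' ≠ t.getD j ' ' then 'S' else 'M']
    else if pvED p t (i+1) (j+1) = pvED p t i (j+1) + 1 then pvPath p t i (j+1) ++ ['D']
    else pvPath p t (i+1) j ++ ['I']
  termination_by i j => i + j

def pvRowED (p t : List Char) (i : Nat) : List Int :=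
  (List.range (t.length+1)).map (fun j => pvED p t i j)

def pvRowPar (p t : List Char) : Nat → List Char
  | 0 => List.replicate (t.length+1) 'X'
  | i+1 => 'X' :: (List.range t.length).map (fun j => pvOp p t i j)

def pvTab (p t : List Char) : List (List Int) :=
  (List.range (p.length+1)).map (pvRowED p t)

def pvPar (p t : List Char) : List (List Char) :=
  (List.range (p.length+1)).map (pvRowPar p t)

-- B's row i as the spec predicts it
def pvRowB (p t : List Char) (i : Nat) : List (Int × List Char) :=
  (List.range (t.length+1)).map (fun j => (pvED p t i j, pvPath p t i j))

lemma pv_set_append_len {α : Type} (l r : List α) (x v : α) :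
    (l ++ x :: r).set l.length v = l ++ v :: r := by
  induction l with
  | nil => rfl
  | cons a l ih => simp [ih]

lemma pv_getD_append_len {α : Type} (l r : List α) (x d : α) :
    (l ++ x :: r).getD l.length d = x := by
  simp [List.getD]

lemma pv_set_append_len' {α : Type} (l r : List α) (x v : α) (n : Nat) (hn : n = l.length) :
    (l ++ x :: r).set n v = l ++ v :: r := by
  subst hn; exact pv_set_append_len l r x v

lemma pv_getD_append_len' {α : Type} (l r : List α) (x d : α) (n : Nat) (hn : n = l.length) :
    (l ++ x :: r).getD n d = x := by
  subst hn; exact pv_getD_append_len l r x d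

lemma pv_foldl_set_prefix {α : Type} (d₀ : α) (h : Nat → α → α) :
    ∀ (N : Nat) (l : List α), N ≤ l.length →
      (List.range N).foldl (fun d i => d.set i (h i (d.getD i d₀))) l
        = (List.range N).map (fun i => h i (l.getD i d₀)) ++ l.drop N := by
  intro N
  induction N with
  | zero => intro l _; simp
  | succ N ih =>
    intro l hN
    have hlt : N < l.length := by omega
    rw [List.range_succ, List.foldl_append, List.map_append, ih l (by omega)]
    have hdrop : l.drop N = l.getD N d₀ :: l.drop (N+1) := by
      rw [List.getD_eq_getElem l d₀ hlt]; exact List.drop_eq_getElem_cons hlt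
    have hlen : ((List.range N).map (fun i => h i (l.getD i d₀))).length = N := by simp
    rw [hdrop]
    simp only [List.foldl_cons, List.foldl_nil]
    rw [pv_getD_append_len' _ _ _ _ _ hlen.symm, pv_set_append_len' _ _ _ _ _ hlen.symm]
    simp

lemma pv_foldl_set_zero {α : Type} (d₀ : α) (g : Nat → α → α) :
    ∀ (L : List Nat) (r : α) (rest : List α),
      L.foldl (fun d j => d.set 0 (g j (d.getD 0 d₀))) (r :: rest)
        = (L.foldl (fun r j => g j r) r) :: rest := by
  intro L
  induction L with
  | nil => intro r rest; rfl
  | cons a L ih =>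
    intro r rest
    rw [List.foldl_cons, List.foldl_cons]
    have h0 : (r :: rest).set 0 (g a ((r :: rest).getD 0 d₀)) = g a r :: rest := by
      simp [List.getD]
    rw [h0, ih]

lemma pvED_le (p t : List Char) : ∀ i j, pvED p t i j ≤ (i : Int) + j := by
  intro i
  cases i with
  | zero => intro j; simp [pvED]
  | succ i =>
    intro j
    induction j with
    | zero => simp [pvED]
    | succ j ihj =>
      have h3 : pvED p t (i+1) (j+1) ≤ pvED p t (i+1) j + 1 := by
        have he : pvED p t (i+1) (j+1)
            = min (pvED p t i j + (if p.getD i ' ' ≠ t.getD j ' ' then 1 else 0))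
                (min (pvED p t i (j+1) + 1) (pvED p t (i+1) j + 1)) := by
          simp [pvED]
        rw [he]
        exact le_trans (min_le_right _ _) (min_le_right _ _)
      push_cast
      push_cast at ihj
      omega

lemma pv_min3_resolve (a b c v : Int) (hv : v = min a (min b c)) (ha : v ≠ a) (hb : v ≠ b) :
    v = c := by
  rcases min_cases a (min b c) with ⟨h1, _⟩ | ⟨h1, _⟩ <;>
    rcases min_cases b c with ⟨h2, _⟩ | ⟨h2, _⟩ <;> omega

lemma pvED_zero (p t : List Char) (j : Nat) : pvED p t 0 j = (j : Int) := by simp [pvED]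

lemma pvED_succ_zero (p t : List Char) (i : Nat) : pvED p t (i+1) 0 = (i : Int) + 1 := by
  simp [pvED]

lemma pvED_succ_succ (p t : List Char) (i j : Nat) :
    pvED p t (i+1) (j+1)
      = min (pvED p t i j + (if p.getD i ' ' ≠ t.getD j ' ' then 1 else 0))
          (min (pvED p t i (j+1) + 1) (pvED p t (i+1) j + 1)) := by
  simp [pvED]

lemma pvPath_zero (p t : List Char) (j : Nat) : pvPath p t 0 j = List.replicate j 'I' := by
  simp [pvPath]

lemma pvPath_succ_zero (p t : List Char) (i : Nat) :
    pvPath p t (i+1) 0 = List.replicate (i+1) 'D' := by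
  simp [pvPath]

lemma pvPath_succ_succ (p t : List Char) (i j : Nat) :
    pvPath p t (i+1) (j+1)
      = if pvED p t (i+1) (j+1) = pvED p t i j + (if p.getD i ' ' ≠ t.getD j ' ' then 1 else 0) then
          pvPath p t i j ++ [if p.getD i ' ' ≠ t.getD j ' ' then 'S' else 'M']
        else if pvED p t (i+1) (j+1) = pvED p t i (j+1) + 1 then pvPath p t i (j+1) ++ ['D']
        else pvPath p t (i+1) j ++ ['I'] := by
  simp [pvPath]

lemma pvPath_i0 (p t : List Char) (i : Nat) : pvPath p t i 0 = List.replicate i 'D' := by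
  cases i with
  | zero => simp [pvPath_zero]
  | succ i => exact pvPath_succ_zero p t i

lemma pv_foldl_set_prefix' {α : Type} (f : Nat → α) :
    ∀ (N : Nat) (l : List α), N ≤ l.length →
      (List.range N).foldl (fun d i => d.set i (f i)) l
        = (List.range N).map f ++ l.drop N := by
  intro N
  induction N with
  | zero => intro l _; simp
  | succ N ih =>
    intro l hN
    have hlt : N < l.length := by omega
    rw [List.range_succ, List.foldl_append, List.map_append, ih l (by omega)]
    have hdrop : l.drop N = l.getD N (f 0) :: l.drop (N+1) := by
      rw [List.getD_eq_getElem l (f 0) hlt]; exact List.drop_eq_getElem_cons hlt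
    have hlen : ((List.range N).map f).length = N := by simp
    rw [hdrop]
    simp only [List.foldl_cons, List.foldl_nil]
    rw [pv_set_append_len' _ _ _ _ _ hlen.symm]
    simp

lemma pv_getD_rowED (p t : List Char) (i j : Nat) (hj : j < t.length + 1) :
    (pvRowED p t i).getD j 0 = pvED p t i j :=
  PySem.List.getD_map_range _ _ _ _ hj

lemma pv_range'_eq_map (m : Nat) : List.range' 1 m = (List.range m).map Nat.succ := by
  induction m with
  | zero => rfl
  | succ m ih =>
    rw [List.range'_1_concat, List.range_succ, List.map_append, ih, Nat.add_comm 1 m]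
    rfl

lemma pv_range'_concat (k : Nat) : List.range' 1 (k+1) = List.range' 1 k ++ [k+1] := by
  rw [List.range'_1_concat, Nat.add_comm 1 k]

-- A's inner loop over j = 1..k on a row started as [i, 0, …, 0]
lemma pvAInner_spec (p t : List Char) (i : Nat) (hi : 1 ≤ i)
    (rest : List (List Int)) (rrest : List (List Char)) :
    ∀ (k : Nat), k ≤ t.length →
    (List.range' 1 k).foldl (fun st j => pvAStep p t i st j)
      ((List.range i).map (pvRowED p t) ++ (((i:Int)) :: List.replicate t.length 0) :: rest,
       (List.range i).map (pvRowPar p t) ++ (List.replicate (t.length+1) 'X') :: rrest)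
    = ((List.range i).map (pvRowED p t) ++
         ((List.range (k+1)).map (pvED p t i) ++ List.replicate (t.length-k) 0) :: rest,
       (List.range i).map (pvRowPar p t) ++
         ('X' :: ((List.range k).map (pvOp p t (i-1)) ++ List.replicate (t.length-k) 'X')) :: rrest) := by
  obtain ⟨i', rfl⟩ : ∃ i', i = i' + 1 := ⟨i - 1, by omega⟩
  simp only [Nat.add_sub_cancel]
  intro k
  induction k with
  | zero =>
    intro _
    rw [show List.range' 1 0 = ([] : List Nat) from rfl, List.foldl_nil,
      show List.range 1 = [0] from rfl]
    simp [pvED_succ_zero, List.replicate_succ]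
  | succ k ih =>
    intro hk
    rw [pv_range'_concat, List.foldl_append, ih (by omega), List.foldl_cons, List.foldl_nil]
    have lenA : ((List.range (i'+1)).map (pvRowED p t)).length = i'+1 := by simp
    have lenA' : ((List.range (i'+1)).map (pvRowPar p t)).length = i'+1 := by simp
    simp only [pvAStep, Nat.add_sub_cancel]
    have hd1 : (((List.range (i'+1)).map (pvRowED p t) ++
          ((List.range (k+1)).map (pvED p t (i'+1)) ++ List.replicate (t.length-k) 0) :: rest).getD i' [])
        = pvRowED p t i' := by
      rw [List.getD_append _ _ _ _ (by simp)]
      exact PySem.List.getD_map_range _ _ _ _ (by omega)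
    have hd2 : (((List.range (i'+1)).map (pvRowED p t) ++
          ((List.range (k+1)).map (pvED p t (i'+1)) ++ List.replicate (t.length-k) 0) :: rest).getD (i'+1) [])
        = (List.range (k+1)).map (pvED p t (i'+1)) ++ List.replicate (t.length-k) 0 :=
      pv_getD_append_len' _ _ _ _ _ lenA.symm
    have hr2 : (((List.range (i'+1)).map (pvRowPar p t) ++
          ('X' :: ((List.range k).map (pvOp p t i') ++ List.replicate (t.length-k) 'X')) :: rrest).getD (i'+1) [])
        = 'X' :: ((List.range k).map (pvOp p t i') ++ List.replicate (t.length-k) 'X') :=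
      pv_getD_append_len' _ _ _ _ _ lenA'.symm
    rw [hd1, hd2, hr2]
    rw [pv_getD_rowED p t i' k (by omega), pv_getD_rowED p t i' (k+1) (by omega)]
    have hr1 : ((List.range (k+1)).map (pvED p t (i'+1)) ++ List.replicate (t.length-k) 0).getD k 0
        = pvED p t (i'+1) k := by
      rw [List.getD_append _ _ _ _ (by simp)]
      exact PySem.List.getD_map_range _ _ _ _ (by omega)
    rw [hr1]
    have hkw : (if p.getD i' ' ' ≠ t.getD k ' ' then pvED p t i' k + 1 else pvED p t i' k)
        = pvED p t i' k + (if p.getD i' ' ' ≠ t.getD k ' ' then 1 else 0) := by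
      split <;> simp
    rw [hkw, (pvED_succ_succ p t i' k).symm]
    have hset1 : ((List.range (k+1)).map (pvED p t (i'+1)) ++ List.replicate (t.length-k) 0).set (k+1)
          (pvED p t (i'+1) (k+1))
        = (List.range (k+1+1)).map (pvED p t (i'+1)) ++ List.replicate (t.length-(k+1)) 0 := by
      rw [show t.length - k = (t.length - (k+1)) + 1 from by omega, List.replicate_succ,
        pv_set_append_len' _ _ _ _ _ (by simp), List.range_succ (n := k+1), List.map_append,
        List.append_assoc]
      rfl
    rw [hset1]
    rw [pv_set_append_len' _ _ _ _ _ lenA.symm]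
    have hsetrc : ∀ c : Char,
        ('X' :: ((List.range k).map (pvOp p t i') ++ List.replicate (t.length-k) 'X')).set (k+1) c
          = 'X' :: ((List.range k).map (pvOp p t i') ++ c :: List.replicate (t.length-(k+1)) 'X') := by
      intro c
      rw [show t.length - k = (t.length - (k+1)) + 1 from by omega, List.replicate_succ]
      simp only [List.set_cons_succ]
      rw [pv_set_append_len' _ _ _ _ _ (by simp)]
    have hmerge : ∀ c : Char, pvOp p t i' k = c →
        (List.range k).map (pvOp p t i') ++ c :: List.replicate (t.length-(k+1)) 'X'
          = (List.range (k+1)).map (pvOp p t i') ++ List.replicate (t.length-(k+1)) 'X' := by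
      intro c hc
      rw [← hc, List.range_succ, List.map_append, List.append_assoc]
      rfl
    by_cases h1 : pvED p t (i'+1) (k+1) = pvED p t i' k + (if p.getD i' ' ' ≠ t.getD k ' ' then 1 else 0)
    · rw [if_pos h1]
      by_cases hd : p.getD i' ' ' ≠ t.getD k ' '
      · rw [if_pos hd, hsetrc, pv_set_append_len' _ _ _ _ _ lenA'.symm,
          hmerge 'S' (by unfold pvOp; rw [if_pos h1, if_pos hd])]
      · rw [if_neg hd, hsetrc, pv_set_append_len' _ _ _ _ _ lenA'.symm,
          hmerge 'M' (by unfold pvOp; rw [if_pos h1, if_neg hd])]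
    · rw [if_neg h1]
      by_cases h2 : pvED p t (i'+1) (k+1) = pvED p t i' (k+1) + 1
      · rw [if_pos h2, hsetrc, pv_set_append_len' _ _ _ _ _ lenA'.symm,
          hmerge 'D' (by unfold pvOp; rw [if_neg h1, if_pos h2])]
      · have h3 : pvED p t (i'+1) (k+1) = pvED p t (i'+1) k + 1 :=
          pv_min3_resolve _ _ _ _ (pvED_succ_succ p t i' k) h1 h2
        rw [if_neg h2, if_pos h3, hsetrc, pv_set_append_len' _ _ _ _ _ lenA'.symm,
          hmerge 'I' (by unfold pvOp; rw [if_neg h1, if_neg h2])]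

-- the two initialisation loops of dopasowanie_PD
lemma pvAInit_spec (p t : List Char) :
    (List.range (t.length+1)).foldl
      (fun d j => d.set 0 ((d.getD 0 []).set j (j:Int)))
      ((List.range (p.length+1)).foldl
        (fun d i => d.set i ((d.getD i []).set 0 (i:Int)))
        ((List.range (p.length+1)).map (fun _ => List.replicate (t.length+1) (0:Int))))
    = pvRowED p t 0 :: (List.range' 1 p.length).map (fun (a : Nat) => ((a : Int) :: List.replicate t.length 0)) := by
  have h1 := pv_foldl_set_prefix ([] : List Int) (fun i row => row.set 0 (i:Int)) (p.length+1)
      ((List.range (p.length+1)).map (fun _ => List.replicate (t.length+1) (0:Int))) (by simp)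
  simp only [] at h1
  rw [h1, List.drop_eq_nil_of_le (by simp), List.append_nil]
  have h2 : (List.range (p.length+1)).map
        (fun i => (((List.range (p.length+1)).map (fun _ => List.replicate (t.length+1) (0:Int))).getD i []).set 0 (i:Int))
      = (List.range (p.length+1)).map (fun (i : Nat) => ((i : Int) :: List.replicate t.length 0)) := by
    refine List.map_congr_left ?_
    intro i hi
    rw [PySem.List.getD_map_range _ _ _ _ (List.mem_range.mp hi), List.replicate_succ,
      List.set_cons_zero]
  rw [h2]
  have h3 : (List.range (p.length+1)).map (fun (i : Nat) => ((i : Int) :: List.replicate t.length 0))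
      = (((0:Nat):Int) :: List.replicate t.length 0)
        :: (List.range' 1 p.length).map (fun (a : Nat) => ((a : Int) :: List.replicate t.length 0)) := by
    rw [List.range_succ_eq_map, List.map_cons, List.map_map, pv_range'_eq_map, List.map_map]
  rw [h3]
  have h4 := pv_foldl_set_zero ([] : List Int) (fun j row => row.set j (j:Int))
      (List.range (t.length+1)) (((0:Nat):Int) :: List.replicate t.length 0)
      ((List.range' 1 p.length).map (fun (a : Nat) => ((a : Int) :: List.replicate t.length 0)))
  simp only [] at h4
  rw [h4]
  have h5 := pv_foldl_set_prefix' (fun (j : Nat) => (j : Int)) (t.length+1)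
      (((0:Nat):Int) :: List.replicate t.length 0) (by simp)
  rw [h5, List.drop_eq_nil_of_le (by simp), List.append_nil]
  have h6 : (List.range (t.length+1)).map (fun (j : Nat) => (j : Int)) = pvRowED p t 0 := by
    refine List.map_congr_left ?_
    intro j _
    rw [pvED_zero]
  rw [h6]

lemma pvAOuter_spec (p t : List Char) :
    ∀ (k : Nat), k ≤ p.length →
    (List.range' 1 k).foldl
      (fun st i => (List.range' 1 t.length).foldl (fun st j => pvAStep p t i st j) st)
      (pvRowED p t 0 :: (List.range' 1 p.length).map (fun (a : Nat) => ((a : Int) :: List.replicate t.length 0)),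
       (List.range (p.length+1)).map (fun _ => List.replicate (t.length+1) 'X'))
    = ((List.range (k+1)).map (pvRowED p t)
         ++ (List.range' (k+1) (p.length - k)).map (fun (a : Nat) => ((a : Int) :: List.replicate t.length 0)),
       (List.range (k+1)).map (pvRowPar p t)
         ++ List.replicate (p.length - k) (List.replicate (t.length+1) 'X')) := by
  intro k
  induction k with
  | zero =>
    intro _
    rw [show List.range' 1 0 = ([] : List Nat) from rfl, List.foldl_nil,
      show List.range 1 = [0] from rfl]
    simp only [List.map_cons, List.map_nil, Nat.sub_zero, List.singleton_append]
    refine Prod.ext ?_ ?_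
    · rfl
    · show (List.range (p.length+1)).map (fun _ => List.replicate (t.length+1) 'X')
        = pvRowPar p t 0 :: List.replicate p.length (List.replicate (t.length+1) 'X')
      rw [show (List.range (p.length+1)).map (fun _ => List.replicate (t.length+1) 'X')
            = List.replicate (p.length+1) (List.replicate (t.length+1) 'X') from by
          simp [List.map_const'], List.replicate_succ]
      rfl
  | succ k ih =>
    intro hk
    rw [pv_range'_concat, List.foldl_append, ih (by omega), List.foldl_cons, List.foldl_nil]
    rw [show p.length - k = (p.length - (k+1)) + 1 from by omega, List.range'_succ,
      List.replicate_succ, List.map_cons]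
    have hinner := pvAInner_spec p t (k+1) (by omega)
      ((List.range' (k+1+1) (p.length - (k+1))).map (fun (a : Nat) => ((a : Int) :: List.replicate t.length 0)))
      (List.replicate (p.length - (k+1)) (List.replicate (t.length+1) 'X'))
      t.length le_rfl
    simp only [Nat.add_sub_cancel, Nat.sub_self, List.replicate_zero, List.append_nil] at hinner
    rw [hinner]
    refine Prod.ext ?_ ?_
    · show _ = (List.range (k+1+1)).map (pvRowED p t) ++ _
      rw [List.range_succ (n := k+1), List.map_append, List.append_assoc]
      rfl
    · show _ = (List.range (k+1+1)).map (pvRowPar p t) ++ _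
      rw [List.range_succ (n := k+1), List.map_append, List.append_assoc]
      rfl

lemma dopasowanie_PD_eq (p t : List Char) :
    dopasowanie_PD p t = (pvTab p t, pvPar p t) := by
  unfold dopasowanie_PD
  simp only []
  rw [pvAInit_spec]
  have h := pvAOuter_spec p t p.length le_rfl
  simp only [Nat.sub_self, List.range'_zero, List.replicate_zero, List.map_nil, List.append_nil] at h
  rw [h]
  rfl

-- A's backtracking, reversed, is the forward path of pvPath
lemma pvAPath_eq (p t : List Char) :
    ∀ (N i j : Nat) (acc : List Char), i + j ≤ N → i ≤ p.length → j ≤ t.length →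
      (odtwarzanie_sciezki (pvPar p t) acc i j).reverse = pvPath p t i j ++ acc.reverse := by
  intro N
  induction N with
  | zero =>
    intro i j acc h _ _
    obtain rfl : i = 0 := by omega
    obtain rfl : j = 0 := by omega
    simp [odtwarzanie_sciezki, pvPath_zero]
  | succ N ih =>
    intro i j acc h hm hn
    rcases i with _ | i
    · rcases j with _ | j
      · simp [odtwarzanie_sciezki, pvPath_zero]
      · simp only [odtwarzanie_sciezki]
        rw [ih 0 j _ (by omega) (by omega) (by omega), pvPath_zero, pvPath_zero,
          List.replicate_succ']
        simp
    · rcases j with _ | j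
      · simp only [odtwarzanie_sciezki]
        rw [ih i 0 _ (by omega) (by omega) (by omega), pvPath_i0, pvPath_i0,
          List.replicate_succ']
        simp
      · have hpar : (pvPar p t).getD (i+1) [] = pvRowPar p t (i+1) :=
          PySem.List.getD_map_range _ _ _ _ (by omega)
        have hop : (pvRowPar p t (i+1)).getD (j+1) 'X' = pvOp p t i j := by
          show (('X' :: (List.range t.length).map (pvOp p t i)).getD (j+1) 'X') = _
          rw [List.getD_cons_succ]
          exact PySem.List.getD_map_range _ _ _ _ (by omega)
        simp only [odtwarzanie_sciezki]
        rw [hpar, hop, pvPath_succ_succ]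
        unfold pvOp
        by_cases h1 : pvED p t (i+1) (j+1) = pvED p t i j + (if p.getD i ' ' ≠ t.getD j ' ' then 1 else 0)
        · rw [if_pos h1, if_pos h1]
          by_cases hd : p.getD i ' ' ≠ t.getD j ' '
          · rw [if_pos hd, if_pos (by decide : ('S' : Char) = 'M' ∨ ('S' : Char) = 'S')]
            rw [ih i j _ (by omega) (by omega) (by omega)]
            simp
          · rw [if_neg hd, if_pos (by decide : ('M' : Char) = 'M' ∨ ('M' : Char) = 'S')]
            rw [ih i j _ (by omega) (by omega) (by omega)]
            simp
        · rw [if_neg h1, if_neg h1]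
          by_cases h2 : pvED p t (i+1) (j+1) = pvED p t i (j+1) + 1
          · rw [if_pos h2, if_pos h2, if_neg (by decide : ¬(('D' : Char) = 'M' ∨ ('D' : Char) = 'S')),
              if_neg (by decide : ('D' : Char) ≠ 'I'), if_pos (rfl : ('D' : Char) = 'D')]
            rw [ih i (j+1) _ (by omega) (by omega) (by omega)]
            simp
          · rw [if_neg h2, if_neg h2, if_neg (by decide : ¬(('I' : Char) = 'M' ∨ ('I' : Char) = 'S')),
              if_pos (rfl : ('I' : Char) = 'I')]
            rw [ih (i+1) j _ (by omega) (by omega) (by omega)]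
            simp

-- B's inner loop produces the spec row
lemma pvBRow_eq (p t : List Char) (i' : Nat) :
    pvBRow p t (pvRowB p t i') (i'+1) = pvRowB p t (i'+1) := by
  have inv : ∀ k, k ≤ t.length →
      (List.range' 1 k).foldl (fun row j => pvBStep p t (pvRowB p t i') (i'+1) row j)
          [(((i'+1 : Nat) : Int), List.replicate (i'+1) 'D')]
        = (List.range (k+1)).map (fun j => (pvED p t (i'+1) j, pvPath p t (i'+1) j)) := by
    intro k
    induction k with
    | zero =>
      intro _
      rw [show List.range' 1 0 = ([] : List Nat) from rfl, List.foldl_nil,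
        show List.range 1 = [0] from rfl]
      simp [pvED_succ_zero, pvPath_succ_zero]
    | succ k ih =>
      intro hk
      rw [pv_range'_concat, List.foldl_append, ih (by omega), List.foldl_cons, List.foldl_nil]
      simp only [pvBStep, Nat.add_sub_cancel]
      have hprev : ∀ m, m < t.length + 1 →
          (pvRowB p t i').getD m ((0:Int), ([] : List Char)) = (pvED p t i' m, pvPath p t i' m) :=
        fun m hm => PySem.List.getD_map_range _ _ _ _ hm
      have hrow : ((List.range (k+1)).map
            (fun j => (pvED p t (i'+1) j, pvPath p t (i'+1) j))).getD k ((0:Int), ([] : List Char))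
          = (pvED p t (i'+1) k, pvPath p t (i'+1) k) :=
        PySem.List.getD_map_range _ _ _ _ (by omega)
      rw [hprev k (by omega), hprev (k+1) (by omega), hrow]
      simp only []
      rw [(pvED_succ_succ p t i' k).symm]
      rw [List.range_succ (n := k+1), List.map_append]
      by_cases h1 : pvED p t (i'+1) (k+1) = pvED p t i' k + (if p.getD i' ' ' ≠ t.getD k ' ' then 1 else 0)
      · rw [if_pos h1]
        refine congrArg _ ?_
        simp only [List.map_cons, List.map_nil]
        rw [pvPath_succ_succ, if_pos h1]
      · rw [if_neg h1]
        by_cases h2 : pvED p t (i'+1) (k+1) = pvED p t i' (k+1) + 1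
        · rw [if_pos h2]
          refine congrArg _ ?_
          simp only [List.map_cons, List.map_nil]
          rw [pvPath_succ_succ, if_neg h1, if_pos h2]
        · rw [if_neg h2]
          refine congrArg _ ?_
          simp only [List.map_cons, List.map_nil]
          rw [pvPath_succ_succ, if_neg h1, if_neg h2]
  unfold pvBRow
  rw [inv t.length le_rfl]
  rfl

-- B's outer loop keeps exactly the spec row
lemma pvBOuter_eq (p t : List Char) :
    ∀ k, (List.range' 1 k).foldl (fun r i => pvBRow p t r i)
        ((List.range (t.length+1)).map (fun (j : Nat) => ((j : Int), List.replicate j 'I')))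
      = pvRowB p t k := by
  have h0 : (List.range (t.length+1)).map (fun (j : Nat) => ((j : Int), List.replicate j 'I'))
      = pvRowB p t 0 := by
    refine List.map_congr_left ?_
    intro j _
    rw [pvED_zero, pvPath_zero]
  intro k
  induction k with
  | zero =>
    rw [show List.range' 1 0 = ([] : List Nat) from rfl, List.foldl_nil, h0]
  | succ k ih =>
    rw [pv_range'_concat, List.foldl_append, ih, List.foldl_cons, List.foldl_nil]
    exact pvBRow_eq p t k

lemma pvMin_eq (p t : List Char) :
    (List.range (t.length+1)).foldl
        (fun acc j => min acc ((pvRowED p t p.length).getD j 0))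
        ((p.length : Int) + (t.length : Int) + 1)
      = (PySem.List.min? (pvRowED p t p.length) (fun x => x)).getD 0 := by
  have hfold : (List.range (t.length+1)).foldl
        (fun acc j => min acc ((pvRowED p t p.length).getD j 0))
        ((p.length : Int) + (t.length : Int) + 1)
      = ((List.range (t.length+1)).map (fun j => (pvRowED p t p.length).getD j 0)).foldl
          (fun (a b : Int) => min a b) ((p.length : Int) + (t.length : Int) + 1) :=
    (List.foldl_map).symm
  rw [hfold]
  have hmap : (List.range (t.length+1)).map (fun j => (pvRowED p t p.length).getD j 0)
      = pvRowED p t p.length := by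
    refine List.map_congr_left ?_
    intro j hj
    exact pv_getD_rowED p t p.length j (List.mem_range.mp hj)
  rw [hmap]
  have hsplit : pvRowED p t p.length
      = pvED p t p.length 0 :: (List.range t.length).map (fun j => pvED p t p.length (j+1)) := by
    unfold pvRowED
    rw [List.range_succ_eq_map, List.map_cons, List.map_map]
    rfl
  rw [hsplit, List.foldl_cons, PySem.List.min?_id_cons]
  have hle : pvED p t p.length 0 ≤ (p.length : Int) + (t.length : Int) + 1 := by
    have := pvED_le p t p.length 0
    push_cast at this ⊢
    omega
  rw [min_eq_right hle]
  rfl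

lemma pvRowB_fst (p t : List Char) (k : Nat) :
    (pvRowB p t k).map Prod.fst = pvRowED p t k := by
  unfold pvRowB pvRowED
  rw [List.map_map]
  rfl

-- ===== VERDICT (by name: the statement is the Claim_ definition above) =====
theorem wyszukaj_podciag_spec : Claim_equal_wyszukaj_podciag := by
  intro P T _
  unfold Spec_wyszukaj_podciag wyszukaj_podciag wyszukaj_podciag_alt
  simp only [dopasowanie_PD_eq, pvBOuter_eq]
  have htab : (pvTab P.toList T.toList).getD P.toList.length []
      = pvRowED P.toList T.toList P.toList.length :=
    PySem.List.getD_map_range _ _ _ _ (by omega)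
  have hrow : (pvRowB P.toList T.toList P.toList.length).getD T.toList.length ((0:Int), ([] : List Char))
      = (pvED P.toList T.toList P.toList.length T.toList.length,
         pvPath P.toList T.toList P.toList.length T.toList.length) :=
    PySem.List.getD_map_range _ _ _ _ (by omega)
  simp only [htab, hrow, pvMin_eq, pvRowB_fst]
  rw [pvAPath_eq P.toList T.toList (P.toList.length + T.toList.length) _ _ _ le_rfl le_rfl le_rfl]
  simp
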